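-- pv_equiv track=rewrite | github.com/Chemokoren/Algorithms-1 | GFG/Arrays/OptimizationProblems/find_subarray_least_average.py | findsubarrayleast
-- ===== SOURCE A (Python) =====
-- def findsubarrayleast(arr, k):
--     min = 999999
--     minindex  =0
--
--
--     for i in range(len(arr)-k):
--         sum = 0
--         j =i
--         for j in range(i, i+k):
--             sum += arr[j]
--         if sum < min :
--             min = sum
--             minindex =i
--
--     return arr[minindex:minindex + k]
-- ===== SOURCE B (Python) =====
-- def findsubarrayleast(arr, k):
--     n = len(arr)
--     best = 999999
--     besti = 0
--     if k > 0 and n - k > 0: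
--         s = sum(arr[:k])
--         if s < best:
--             best, besti = s, 0
--         for i in range(1, n - k):
--             s += arr[i + k - 1] - arr[i - 1]
--             if s < best:
--                 best, besti = s, i
--     return arr[besti:besti + k]
-- ===== Notes on version B (the rewrite author's own statement) =====
-- stated objective: faster
-- what changed: Replaces the nested per-window summation with a sliding-window running sum updated incrementally (add entering element, subtract leaving one), keeping A's exact loop bound range(n-k), sentinel initial minimum and strict-< tie-break.
import Mathlib
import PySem

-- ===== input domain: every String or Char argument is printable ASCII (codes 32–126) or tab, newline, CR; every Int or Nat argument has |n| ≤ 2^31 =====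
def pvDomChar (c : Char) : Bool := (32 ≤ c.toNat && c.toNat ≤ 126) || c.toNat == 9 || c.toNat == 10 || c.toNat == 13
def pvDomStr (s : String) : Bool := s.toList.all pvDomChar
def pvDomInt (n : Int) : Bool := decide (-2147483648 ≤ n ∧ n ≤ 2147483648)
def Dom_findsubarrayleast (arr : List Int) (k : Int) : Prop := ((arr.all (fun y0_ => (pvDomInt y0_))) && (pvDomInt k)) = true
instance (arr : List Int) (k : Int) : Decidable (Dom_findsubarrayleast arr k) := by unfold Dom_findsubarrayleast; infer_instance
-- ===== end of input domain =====

-- B replaces A's per-window re-summation by a sliding-window running sum,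
-- keeping A's exact loop bound range(len(arr)-k), sentinel initial minimum and strict-< tie-break.

-- ===== PORT A =====
def findsubarrayleast (arr : List Int) (k : Int) : List Int :=
  let n : Int := arr.length
  let st :=
    (PySem.List.pyRange 0 (n - k) 1).foldl
      (fun (st : Int × Int) i =>
        let s := (PySem.List.pyRange i (i + k) 1).foldl
          (fun acc j => acc + PySem.List.pyGetD arr j 0) 0
        if s < st.1 then (s, i) else st)
      (999999, 0)
  PySem.List.slice arr (some st.2) (some (st.2 + k))

-- ===== PORT B =====
def findsubarrayleast_alt (arr : List Int) (k : Int) : List Int :=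
  let n : Int := arr.length
  let besti : Int :=
    if k > 0 ∧ n - k > 0 then
      -- s = sum(arr[:k])
      let s0 := (PySem.List.slice arr (some 0) (some k)).foldl (· + ·) 0
      let st0 : Int × Int × Int := if s0 < 999999 then (s0, 0, s0) else (999999, 0, s0)
      -- state (best, besti, s); s += arr[i+k-1] - arr[i-1]
      let st := (PySem.List.pyRange 1 (n - k) 1).foldl
        (fun (st : Int × Int × Int) i =>
          let s := st.2.2 + PySem.List.pyGetD arr (i + k - 1) 0
                         - PySem.List.pyGetD arr (i - 1) 0
          if s < st.1 then (s, i, s) else (st.1, st.2.1, s))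
        st0
      st.2.1
    else 0
  PySem.List.slice arr (some besti) (some (besti + k))

-- ===== PRECONDITION & SPEC =====
def Spec_findsubarrayleast (arr : List Int) (k : Int) (out : List Int) : Prop := out = findsubarrayleast_alt arr k
instance (arr : List Int) (k : Int) (out : List Int) : Decidable (Spec_findsubarrayleast arr k out) := by unfold Spec_findsubarrayleast; infer_instance

-- ===== CLAIM (what is proved, stated in full; the proofs are below) =====
def Claim_equal_findsubarrayleast : Prop := ∀ (arr : List Int) (k : Int), Dom_findsubarrayleast arr k → Spec_findsubarrayleast arr k (findsubarrayleast arr k)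

-- ===== LEMMAS AND PROOFS =====

-- window sum of A at start index i
def pvW (arr : List Int) (k i : Int) : Int :=
  (PySem.List.pyRange i (i + k) 1).foldl (fun acc j => acc + PySem.List.pyGetD arr j 0) 0

-- reference scan: (best, besti) after processing windows 0..t-1 with A's update rule
def pvG (arr : List Int) (k : Int) : ℕ → Int × Int
  | 0 => (999999, 0)
  | t+1 => if pvW arr k (t : Int) < (pvG arr k t).1 then (pvW arr k (t : Int), (t : Int)) else pvG arr k t

lemma pvG_zero (arr : List Int) (k : Int) : pvG arr k 0 = (999999, 0) := rfl

lemma pvG_succ (arr : List Int) (k : Int) (t : ℕ) :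
    pvG arr k (t + 1) = if pvW arr k (t : Int) < (pvG arr k t).1
      then (pvW arr k (t : Int), (t : Int)) else pvG arr k t := rfl

lemma pvW_eq_sum (arr : List Int) (k i : Int) :
    pvW arr k i = ((PySem.List.pyRange i (i + k) 1).map (fun j => PySem.List.pyGetD arr j 0)).sum := by
  simpa using PySem.List.foldl_add (l := PySem.List.pyRange i (i + k) 1)
    (g := fun j => PySem.List.pyGetD arr j 0) (a := 0)

lemma pvW_nonpos (arr : List Int) (k i : Int) (hk : k ≤ 0) : pvW arr k i = 0 := by
  unfold pvW
  rw [PySem.List.pyRange_one_eq_nil (by omega)]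
  rfl

-- sliding recurrence, unconditional for 0 ≤ k
lemma pvW_succ (arr : List Int) (k i : Int) (hk : 0 ≤ k) :
    pvW arr k (i + 1) = pvW arr k i + PySem.List.pyGetD arr (i + k) 0 - PySem.List.pyGetD arr i 0 := by
  have h1 : PySem.List.pyRange i (i + k + 1) 1 = i :: PySem.List.pyRange (i + 1) (i + k + 1) 1 :=
    PySem.List.pyRange_one_cons (by omega)
  have h2 : PySem.List.pyRange i (i + k + 1) 1 = PySem.List.pyRange i (i + k) 1 ++ [i + k] :=
    PySem.List.pyRange_one_succ_right (by omega)
  have h3 : i + 1 + k = i + k + 1 := by ring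
  rw [pvW_eq_sum, pvW_eq_sum, h3]
  have hA : ((PySem.List.pyRange i (i + k + 1) 1).map (fun j => PySem.List.pyGetD arr j 0)).sum
      = PySem.List.pyGetD arr i 0
        + ((PySem.List.pyRange (i + 1) (i + k + 1) 1).map (fun j => PySem.List.pyGetD arr j 0)).sum := by
    rw [h1]; simp only [List.map_cons, List.sum_cons]
  have hB : ((PySem.List.pyRange i (i + k + 1) 1).map (fun j => PySem.List.pyGetD arr j 0)).sum
      = ((PySem.List.pyRange i (i + k) 1).map (fun j => PySem.List.pyGetD arr j 0)).sum
        + PySem.List.pyGetD arr (i + k) 0 := by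
    rw [h2]; simp only [List.map_append, List.sum_append, List.map_cons, List.map_nil,
      List.sum_cons, List.sum_nil, add_zero]
  omega

-- first window sum equals sum(arr[:k])
lemma pvW_zero (arr : List Int) (k : Int) (hk : 0 ≤ k) (hkn : k ≤ (arr.length : Int)) :
    pvW arr k 0 = (arr.take k.toNat).sum := by
  rw [pvW_eq_sum]
  have hsplit : PySem.List.pyRange 0 (arr.length : Int) 1 =
      PySem.List.pyRange 0 (0 + k) 1 ++ PySem.List.pyRange (0 + k) (arr.length : Int) 1 :=
    PySem.List.pyRange_one_append 0 (0 + k) (arr.length : Int) (by omega) (by omega)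
  have hall : (PySem.List.pyRange 0 (arr.length : Int) 1).map (fun j => PySem.List.pyGetD arr j 0) = arr := by
    simpa using PySem.List.map_pyGetD_pyRange (xs := arr) (a := 0) (d := 0) (by omega)
  have hlen : ((PySem.List.pyRange 0 (0 + k) 1).map (fun j => PySem.List.pyGetD arr j 0)).length = k.toNat := by
    simp [PySem.List.length_pyRange_one]
  have harr : arr = (PySem.List.pyRange 0 (0 + k) 1).map (fun j => PySem.List.pyGetD arr j 0) ++
      (PySem.List.pyRange (0 + k) (arr.length : Int) 1).map (fun j => PySem.List.pyGetD arr j 0) := by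
    rw [← List.map_append, ← hsplit, hall]
  have htake : arr.take k.toNat = (PySem.List.pyRange 0 (0 + k) 1).map (fun j => PySem.List.pyGetD arr j 0) := by
    conv_lhs => rw [harr]
    rw [List.take_append_of_le_length (by omega), ← hlen, List.take_length]
  rw [htake]

-- A's scan over range(0, t) computes pvG t
lemma scanA_eq (arr : List Int) (k : Int) (t : ℕ) :
    (PySem.List.pyRange 0 (t : Int) 1).foldl
      (fun (st : Int × Int) i =>
        if (PySem.List.pyRange i (i + k) 1).foldl
            (fun acc j => acc + PySem.List.pyGetD arr j 0) 0 < st.1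
        then ((PySem.List.pyRange i (i + k) 1).foldl
            (fun acc j => acc + PySem.List.pyGetD arr j 0) 0, i)
        else st)
      (999999, 0) = pvG arr k t := by
  induction t with
  | zero => simp [PySem.List.pyRange_one_eq_nil, pvG]
  | succ t ih =>
    have h : PySem.List.pyRange 0 ((t : Int) + 1) 1 = PySem.List.pyRange 0 (t : Int) 1 ++ [(t : Int)] :=
      PySem.List.pyRange_one_succ_right (by omega)
    push_cast
    rw [h, List.foldl_append, ih, pvG_succ]
    simp only [List.foldl_cons, List.foldl_nil]
    rfl

-- degenerate k ≤ 0: every window sum is 0, so min stays (0, 0) after the first step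
lemma pvG_nonpos (arr : List Int) (k : Int) (hk : k ≤ 0) (t : ℕ) : pvG arr k (t + 1) = (0, 0) := by
  induction t with
  | zero =>
    rw [pvG_succ, pvG_zero, pvW_nonpos arr k _ hk]
    norm_num
  | succ t ih =>
    rw [pvG_succ, ih, pvW_nonpos arr k _ hk]
    norm_num

-- B's scan over range(1, t) carries (pvG t, running sum pvW (t-1))
lemma scanB_eq (arr : List Int) (k : Int) (hk : 0 < k) (hkn : k < (arr.length : Int)) (t : ℕ) (ht : 1 ≤ t) :
    (PySem.List.pyRange 1 (t : Int) 1).foldl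
      (fun (st : Int × Int × Int) i =>
        if st.2.2 + PySem.List.pyGetD arr (i + k - 1) 0 - PySem.List.pyGetD arr (i - 1) 0 < st.1
        then (st.2.2 + PySem.List.pyGetD arr (i + k - 1) 0 - PySem.List.pyGetD arr (i - 1) 0, i,
              st.2.2 + PySem.List.pyGetD arr (i + k - 1) 0 - PySem.List.pyGetD arr (i - 1) 0)
        else (st.1, st.2.1, st.2.2 + PySem.List.pyGetD arr (i + k - 1) 0 - PySem.List.pyGetD arr (i - 1) 0))
      (if (PySem.List.slice arr (some 0) (some k)).foldl (· + ·) 0 < 999999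
       then ((PySem.List.slice arr (some 0) (some k)).foldl (· + ·) 0, 0,
             (PySem.List.slice arr (some 0) (some k)).foldl (· + ·) 0)
       else (999999, 0, (PySem.List.slice arr (some 0) (some k)).foldl (· + ·) 0))
      = ((pvG arr k t).1, (pvG arr k t).2, pvW arr k ((t : Int) - 1)) := by
  have hs0 : (PySem.List.slice arr (some 0) (some k)).foldl (· + ·) 0 = pvW arr k 0 := by
    rw [pvW_zero arr k (by omega) (by omega)]
    have hsl : PySem.List.slice arr (some 0) (some k) = arr.take k.toNat := by
      rw [PySem.List.slice_zero_start, PySem.List.slice_to (xs := arr) (b := k) (by omega)]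
    rw [hsl]
    simpa using PySem.List.foldl_add (l := arr.take k.toNat) (g := fun x => x) (a := (0 : Int))
  induction t with
  | zero => omega
  | succ t ih =>
    cases Nat.eq_or_lt_of_le ht with
    | inl h1 =>
      have ht0 : t = 0 := by omega
      subst ht0
      rw [PySem.List.pyRange_one_eq_nil (by norm_num)]
      simp only [List.foldl_nil, hs0]
      rw [pvG_succ, pvG_zero]
      by_cases h : pvW arr k 0 < (999999 : Int)
      · rw [if_pos h, if_pos (by simpa using h)]
        norm_num
      · rw [if_neg h, if_neg (by simpa using h)]
        norm_num
    | inr h1 =>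
      have ht1 : 1 ≤ t := by omega
      have h : PySem.List.pyRange 1 ((t : Int) + 1) 1 = PySem.List.pyRange 1 (t : Int) 1 ++ [(t : Int)] :=
        PySem.List.pyRange_one_succ_right (by omega)
      push_cast
      rw [h, List.foldl_append, ih ht1]
      simp only [List.foldl_cons, List.foldl_nil]
      have hrec : pvW arr k ((t : Int) - 1) + PySem.List.pyGetD arr ((t : Int) + k - 1) 0
          - PySem.List.pyGetD arr ((t : Int) - 1) 0 = pvW arr k (t : Int) := by
        have hw := pvW_succ arr k ((t : Int) - 1) (by omega)
        have e1 : (t : Int) - 1 + 1 = (t : Int) := by ring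
        have e2 : (t : Int) - 1 + k = (t : Int) + k - 1 := by ring
        rw [e1, e2] at hw
        omega
      rw [hrec, pvG_succ]
      have e3 : (t : Int) + 1 - 1 = (t : Int) := by ring
      rw [e3]
      by_cases hlt : pvW arr k (t : Int) < (pvG arr k t).1
      · rw [if_pos hlt, if_pos hlt]
      · rw [if_neg hlt, if_neg hlt]

-- ===== VERDICT (by name: the statement is the Claim_ definition above) =====
theorem findsubarrayleast_spec : Claim_equal_findsubarrayleast := by
  intro arr k _
  unfold Spec_findsubarrayleast
  simp only [findsubarrayleast, findsubarrayleast_alt]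
  by_cases hc : k > 0 ∧ (arr.length : Int) - k > 0
  · rw [if_pos hc]
    obtain ⟨hk, hn⟩ := hc
    set m : ℕ := ((arr.length : Int) - k).toNat with hm
    have hmi : ((arr.length : Int) - k) = (m : Int) := by omega
    have hm1 : 1 ≤ m := by omega
    rw [hmi, scanA_eq arr k m, scanB_eq arr k hk (by omega) m hm1]
  · rw [if_neg hc]
    by_cases hn : (arr.length : Int) - k ≤ 0
    · rw [PySem.List.pyRange_one_eq_nil hn]
      rfl
    · have hk : k ≤ 0 := by
        by_contra hk'
        exact hc ⟨by omega, by omega⟩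
      obtain ⟨m', hmi⟩ : ∃ m' : ℕ, ((arr.length : Int) - k) = ((m' + 1 : ℕ) : Int) :=
        ⟨((arr.length : Int) - k).toNat - 1, by omega⟩
      rw [hmi, scanA_eq arr k (m' + 1), pvG_nonpos arr k hk m']
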